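-- pv_equiv track=rewrite | github.com/angelatto/Algorithm | 2021-01-10/2.py | solution
-- ===== SOURCE A (Python) =====
-- import collections
--
-- def solution(links):
--     answer = 0
--
--     graph = collections.defaultdict(list)
--     for link in links:
--         graph[link[0]].append(link[1])
--
--     # 먼저, 팀장이면서 팀원이 노드 구하기
--     both = []
--     li_value = []
--     for value in list(graph.values()):
--         for v in value:
--             li_value.append(v)
--
--     for k in list(graph.keys()):
--         if k in li_value:
--             both.append(k)
--
--     # 1. 팀원들끼리 경우의 수
--     temp = collections.defaultdict(list)
--     for g in graph:
--         for v in graph[g]: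
--             if v not in both:
--                 temp[g].append(v)
--
--     n = 1
--     for t in temp:
--         n *= len(temp[t])
--     answer += n
--
--     # 팀장이 낄 때 - 팀장이 없는 팀의 팀원 개수를 모조리 합하기
--     for boss in both:
--         n = 0
--         for g in graph:
--             if boss != g and boss not in graph[g]:
--                 n += len(graph[g])
--         answer += n
--
--     return answer % 1000000007
-- ===== SOURCE B (Python) =====
-- import collections
--
-- def solution(links):
--     graph = collections.defaultdict(list)
--     for link in links:
--         graph[link[0]].append(link[1])
--
--     # nodes that are both a team lead and a member
--     children = set()
--     for vs in graph.values():
--         children.update(vs)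
--     both = [k for k in graph if k in children]
--
--     # product part: each group with at least one non-'both' child contributes that count
--     prod = 1
--     for vs in graph.values():
--         c = sum(1 for v in vs if v not in both)
--         if c != 0:
--             prod *= c
--
--     # boss part by complement: total members minus the boss's own group minus groups containing the boss
--     total = sum(len(vs) for vs in graph.values())
--     incidence = collections.defaultdict(int)  # node -> sum of len(graph[g]) over g != node with node in graph[g]
--     for g, vs in graph.items():
--         for node in set(vs):
--             if node != g:
--                 incidence[node] += len(vs)
--
--     bosses = 0
--     for boss in both:
--         bosses += total - len(graph[boss]) - incidence[boss]
--
--     return (prod + bosses) % 1000000007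
-- ===== Notes on version B (the rewrite author's own statement) =====
-- stated objective: alternative
-- what changed: The boss contribution is computed by complement (grand total of members minus the boss's own group minus a precomputed incidence sum of groups containing the boss) instead of A's nested bosses-by-groups membership scan, and the product part multiplies per-group non-'both' counts directly instead of materialising A's temp defaultdict of filtered lists.
import Mathlib
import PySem

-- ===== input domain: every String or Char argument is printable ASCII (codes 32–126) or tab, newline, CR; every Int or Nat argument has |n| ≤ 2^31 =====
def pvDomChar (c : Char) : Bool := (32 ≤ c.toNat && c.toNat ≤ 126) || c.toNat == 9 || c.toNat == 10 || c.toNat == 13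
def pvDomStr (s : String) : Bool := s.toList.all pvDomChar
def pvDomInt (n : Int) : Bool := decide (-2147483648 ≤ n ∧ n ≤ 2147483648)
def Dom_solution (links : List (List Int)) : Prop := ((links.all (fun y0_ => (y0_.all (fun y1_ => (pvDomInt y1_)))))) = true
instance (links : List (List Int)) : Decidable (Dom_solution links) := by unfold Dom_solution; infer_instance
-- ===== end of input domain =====

-- B replaces A's nested bosses-by-groups scan with a complement computation (total minus own group
-- minus an incidence sum) and drops the temp dict of filtered lists (objective: alternative).

-- ===== PORT A =====
def solution (links : List (List Int)) : Int :=
  let graph := links.foldl (fun d link =>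
      d.modify (PySem.List.pyGetD link 0 0) [] (fun l => l ++ [PySem.List.pyGetD link 1 0]))
      PySem.Dict.empty
  let li_value := graph.values.foldl (fun acc value => value.foldl (fun acc v => acc ++ [v]) acc) ([] : List Int)
  let both := graph.keys.foldl (fun acc k => if k ∈ li_value then acc ++ [k] else acc) ([] : List Int)
  let temp := graph.keys.foldl (fun d g =>
      (graph.getD g []).foldl (fun d v => if v ∈ both then d else d.modify g [] (fun l => l ++ [v])) d)
      (PySem.Dict.empty : PySem.Dict Int (List Int))
  let n := temp.keys.foldl (fun n t => n * ((temp.getD t []).length : Int)) 1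
  let answer := (0 : Int) + n
  let answer := both.foldl (fun answer boss =>
      answer + graph.keys.foldl (fun n g =>
        if boss ≠ g ∧ boss ∉ graph.getD g [] then n + ((graph.getD g []).length : Int) else n) 0) answer
  PySem.Int.mod answer 1000000007

-- ===== PORT B =====
def solution_alt (links : List (List Int)) : Int :=
  let graph := links.foldl (fun d link =>
      d.modify (PySem.List.pyGetD link 0 0) [] (fun l => l ++ [PySem.List.pyGetD link 1 0]))
      PySem.Dict.empty
  let children := graph.values.foldl (fun s vs => PySem.Set.update s vs) PySem.Set.empty
  let both := graph.keys.filter (fun k => k ∈ children)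
  let prod := graph.values.foldl (fun p vs =>
      let c : Int := vs.countP (fun v => v ∉ both)
      if c ≠ 0 then p * c else p) 1
  let total := graph.values.foldl (fun t vs => t + (vs.length : Int)) 0
  -- incidence[node] is only read back via getD, so the defaultdict read ports as getD
  let incidence := graph.items.foldl (fun d p =>
      (PySem.Set.ofList p.2).foldl
        (fun d node => if node ≠ p.1 then d.modify node 0 (fun x => x + (p.2.length : Int)) else d) d)
      (PySem.Dict.empty : PySem.Dict Int Int)
  let bosses := both.foldl (fun acc boss =>
      acc + (total - ((graph.getD boss []).length : Int) - incidence.getD boss 0)) 0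
  PySem.Int.mod (prod + bosses) 1000000007

-- ===== PRECONDITION & SPEC =====
-- Pre_ excludes exactly the inputs where A raises IndexError: some link shorter than 2 entries.
def Pre_solution (links : List (List Int)) : Prop := ∀ link ∈ links, 2 ≤ link.length
instance (links : List (List Int)) : Decidable (Pre_solution links) := by unfold Pre_solution; infer_instance
def pvWitness_solution : List (List Int) := [[1, 2], [2, 3]]
def Spec_solution (links : List (List Int)) (out : Int) : Prop := out = solution_alt links
instance (links : List (List Int)) (out : Int) : Decidable (Spec_solution links out) := by unfold Spec_solution; infer_instance

-- ===== CLAIM (what is proved, stated in full; the proofs are below) =====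
def Claim_equal_solution : Prop := ∀ (links : List (List Int)), Dom_solution links → Pre_solution links → Spec_solution links (solution links)

-- ===== LEMMAS AND PROOFS =====

-- a fold that appends each element to the list stored at the fixed key g
lemma foldl_modify_const_getD (l : List Int) (g b : Int) (d : PySem.Dict Int (List Int)) :
    (l.foldl (fun d v => d.modify g [] (fun xs => xs ++ [v])) d).getD b [] =
      if b = g then d.getD b [] ++ l else d.getD b [] := by
  induction l generalizing d with
  | nil => simp
  | cons a t ih =>
    simp only [List.foldl_cons, ih, PySem.Dict.getD_modify]
    by_cases h : b = g <;> simp [h]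

lemma foldl_modify_const_keys (l : List Int) (g : Int) (d : PySem.Dict Int (List Int))
    (hl : l ≠ []) :
    (l.foldl (fun d v => d.modify g [] (fun xs => xs ++ [v])) d).keys =
      if g ∈ d.keys then d.keys else d.keys ++ [g] := by
  induction l generalizing d with
  | nil => exact absurd rfl hl
  | cons a t ih =>
    have h1 : ((d.modify g [] (fun xs => xs ++ [a]))).keys =
        if g ∈ d.keys then d.keys else d.keys ++ [g] := by
      rw [PySem.Dict.keys_modify]
      by_cases hg : g ∈ d.keys
      · rw [PySem.Dict.keys_insert_of_contains]
        · simp [hg]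
        · exact (PySem.Dict.contains_iff_mem_keys _ _).2 hg
      · rw [PySem.Dict.keys_insert_of_not_contains]
        · simp [hg]
        · cases hc : d.contains g with
          | false => rfl
          | true => exact absurd ((PySem.Dict.contains_iff_mem_keys _ _).1 hc) hg
    by_cases ht : t = []
    · subst ht; simpa using h1
    · simp only [List.foldl_cons]
      rw [ih _ ht, h1]
      have hmem : g ∈ (if g ∈ d.keys then d.keys else d.keys ++ [g]) := by
        by_cases hg : g ∈ d.keys <;> simp [hg]
      simp [hmem]

-- the temp-building double loop: keys are the group keys with a nonempty filtered list
lemma temp_keys (ks : List Int) (F : Int → List Int) (d : PySem.Dict Int (List Int))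
    (hnd : ks.Nodup) (hdisj : ∀ g ∈ ks, g ∉ d.keys) :
    (ks.foldl (fun d g => (F g).foldl (fun d v => d.modify g [] (fun xs => xs ++ [v])) d) d).keys =
      d.keys ++ ks.filter (fun g => decide (F g ≠ [])) := by
  induction ks generalizing d with
  | nil => simp
  | cons a t ih =>
    have hnd' := hnd
    rw [List.nodup_cons] at hnd'
    by_cases hFa : F a = []
    · simp only [List.foldl_cons, hFa, List.foldl_nil, List.filter_cons, decide_not]
      rw [ih _ hnd'.2 (fun g hg => hdisj g (List.mem_cons_of_mem _ hg))]
      simp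
    · simp only [List.foldl_cons, List.filter_cons]
      have hka : a ∉ d.keys := hdisj a (List.mem_cons_self ..)
      have hk1 : ((F a).foldl (fun d v => d.modify a [] (fun xs => xs ++ [v])) d).keys =
          d.keys ++ [a] := by
        rw [foldl_modify_const_keys _ _ _ hFa]; simp [hka]
      rw [ih _ hnd'.2 ?_, hk1]
      · simp [hFa]
      · intro g hg
        rw [hk1]
        simp only [List.mem_append, List.mem_singleton]
        rintro (h | h)
        · exact hdisj g (List.mem_cons_of_mem _ hg) h
        · exact hnd'.1 (h ▸ hg)

lemma temp_getD (ks : List Int) (F : Int → List Int) (d : PySem.Dict Int (List Int)) (b : Int)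
    (hnd : ks.Nodup) :
    (ks.foldl (fun d g => (F g).foldl (fun d v => d.modify g [] (fun xs => xs ++ [v])) d) d).getD b [] =
      if b ∈ ks then d.getD b [] ++ F b else d.getD b [] := by
  induction ks generalizing d with
  | nil => simp
  | cons a t ih =>
    have hnd' := hnd
    rw [List.nodup_cons] at hnd'
    simp only [List.foldl_cons]
    rw [ih _ hnd'.2, foldl_modify_const_getD]
    by_cases hba : b = a
    · subst hba
      simp [hnd'.1]
    · simp [hba]

-- flip of "if v in both: skip else append"
lemma inner_flip (bth : List Int) (g : Int) (vs : List Int) (d : PySem.Dict Int (List Int)) :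
    vs.foldl (fun d v => if v ∈ bth then d else d.modify g [] (fun xs => xs ++ [v])) d =
      (vs.filter (fun v => decide (v ∉ bth))).foldl
        (fun d v => d.modify g [] (fun xs => xs ++ [v])) d := by
  rw [show (fun (d : PySem.Dict Int (List Int)) (v : Int) =>
        if v ∈ bth then d else d.modify g [] (fun xs => xs ++ [v])) =
      (fun d v => if v ∉ bth then d.modify g [] (fun xs => xs ++ [v]) else d) from by
    funext d v; by_cases h : v ∈ bth <;> simp [h]]
  exact PySem.List.foldl_ite_eq_foldl_filter _ _ _ _

lemma temp_eq (ks : List Int) (vals : Int → List Int) (bth : List Int)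
    (d : PySem.Dict Int (List Int)) :
    ks.foldl (fun d g => (vals g).foldl
        (fun d v => if v ∈ bth then d else d.modify g [] (fun xs => xs ++ [v])) d) d =
      ks.foldl (fun d g => ((vals g).filter (fun v => decide (v ∉ bth))).foldl
        (fun d v => d.modify g [] (fun xs => xs ++ [v])) d) d :=
  PySem.List.foldl_congr_mem _ _ _ _ (fun d g _ => inner_flip bth g (vals g) d)

-- the incidence inner loop over a duplicate-free list adds c once for each member ≠ g
lemma incid_inner (l : List Int) (g : Int) (c : Int) (d : PySem.Dict Int Int) (b : Int)
    (hl : l.Nodup) :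
    (l.foldl (fun d node => if node ≠ g then d.modify node 0 (fun x => x + c) else d) d).getD b 0 =
      d.getD b 0 + (if b ∈ l ∧ b ≠ g then c else 0) := by
  induction l generalizing d with
  | nil => simp
  | cons a t ih =>
    have hl' := hl
    rw [List.nodup_cons] at hl'
    simp only [List.foldl_cons]
    rw [ih _ hl'.2]
    by_cases hag : a = g
    · simp only [hag, ne_eq, not_true_eq_false, if_false]
      have : (b ∈ t ∧ b ≠ g) ↔ (b ∈ g :: t ∧ b ≠ g) := by
        constructor
        · rintro ⟨h1, h2⟩; exact ⟨List.mem_cons_of_mem _ h1, h2⟩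
        · rintro ⟨h1, h2⟩
          rcases List.mem_cons.1 h1 with h | h
          · exact absurd h h2
          · exact ⟨h, h2⟩
      rw [if_congr this rfl rfl]
    · simp only [ne_eq, hag, not_false_eq_true, if_true]
      rw [PySem.Dict.getD_modify]
      by_cases hba : b = a
      · subst hba
        have hbt : b ∉ t := hl'.1
        simp [hbt, hag]
      · simp only [hba, if_false]
        have : (b ∈ t ∧ b ≠ g) ↔ (b ∈ a :: t ∧ b ≠ g) := by
          constructor
          · rintro ⟨h1, h2⟩; exact ⟨List.mem_cons_of_mem _ h1, h2⟩
          · rintro ⟨h1, h2⟩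
            rcases List.mem_cons.1 h1 with h | h
            · exact absurd h hba
            · exact ⟨h, h2⟩
        rw [if_congr this rfl rfl]

lemma incid_outer (ps : List (Int × List Int)) (d : PySem.Dict Int Int) (b : Int) :
    (ps.foldl (fun d p => (PySem.Set.ofList p.2).foldl
        (fun d node => if node ≠ p.1 then d.modify node 0 (fun x => x + (p.2.length : Int)) else d)
        d) d).getD b 0 =
      d.getD b 0 +
        (ps.map (fun p => if b ∈ p.2 ∧ b ≠ p.1 then (p.2.length : Int) else 0)).sum := by
  induction ps generalizing d with
  | nil => simp
  | cons p t ih =>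
    simp only [List.foldl_cons, List.map_cons, List.sum_cons]
    rw [ih, incid_inner _ _ _ _ _ (PySem.Set.nodup_ofList _)]
    have : (b ∈ PySem.Set.ofList p.2 ∧ b ≠ p.1) ↔ (b ∈ p.2 ∧ b ≠ p.1) := by
      rw [PySem.Set.mem_ofList]
    rw [if_congr this rfl rfl]
    ring

-- sum over a filtered list as a sum of if-terms over the whole list
lemma sum_map_ite_filter (l : List Int) (p : Int → Prop) [DecidablePred p] (f : Int → Int) :
    ((l.filter (fun x => decide (p x))).map f).sum =
      (l.map (fun x => if p x then f x else 0)).sum := by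
  induction l with
  | nil => simp
  | cons a t ih =>
    by_cases h : p a <;> simp [h, ih]

lemma sum_ite_eq_of_nodup (l : List Int) (b : Int) (f : Int → Int)
    (hnd : l.Nodup) (hb : b ∈ l) :
    (l.map (fun g => if g = b then f g else 0)).sum = f b := by
  induction l with
  | nil => cases hb
  | cons a t ih =>
    have hnd' := hnd
    rw [List.nodup_cons] at hnd'
    rcases List.mem_cons.1 hb with h | h
    · subst h
      simp only [List.map_cons, List.sum_cons]
      rw [if_pos trivial]
      have hz : (t.map (fun g => if g = b then f g else 0)).sum = 0 := by
        apply List.sum_eq_zero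
        intro x hx
        rcases List.mem_map.1 hx with ⟨g, hg, rfl⟩
        have hgb : g ≠ b := fun hga => hnd'.1 (hga ▸ hg)
        simp [hgb]
      rw [hz]; ring
    · have hab : a ≠ b := fun hab => hnd'.1 (hab ▸ h)
      simp only [List.map_cons, List.sum_cons, if_neg hab]
      rw [ih hnd'.2 h]; ring

lemma sum_map_sub3 (l : List Int) (f₁ f₂ f₃ : Int → Int) :
    (l.map (fun g => f₁ g - f₂ g - f₃ g)).sum =
      (l.map f₁).sum - (l.map f₂).sum - (l.map f₃).sum := by
  induction l with
  | nil => simp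
  | cons a t ih => simp only [List.map_cons, List.sum_cons, ih]; ring

-- the complement identity behind B's boss computation
lemma boss_complement (ks : List Int) (vals : Int → List Int) (b : Int)
    (hnd : ks.Nodup) (hb : b ∈ ks) :
    ((ks.filter (fun g => decide (b ≠ g ∧ b ∉ vals g))).map
        (fun g => ((vals g).length : Int))).sum =
      (ks.map (fun g => ((vals g).length : Int))).sum - ((vals b).length : Int) -
        (ks.map (fun g => if b ∈ vals g ∧ b ≠ g then ((vals g).length : Int) else 0)).sum := by
  rw [sum_map_ite_filter ks (fun g => b ≠ g ∧ b ∉ vals g)]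
  have hpt : ∀ g : Int,
      (if b ≠ g ∧ b ∉ vals g then ((vals g).length : Int) else 0) =
        ((vals g).length : Int) - (if g = b then ((vals g).length : Int) else 0) -
          (if b ∈ vals g ∧ b ≠ g then ((vals g).length : Int) else 0) := by
    intro g
    by_cases h1 : g = b
    · subst h1; simp
    · have h1' : b ≠ g := fun h => h1 h.symm
      by_cases h2 : b ∈ vals g <;> simp [h1, h1', h2]
  calc (ks.map (fun g => if b ≠ g ∧ b ∉ vals g then ((vals g).length : Int) else 0)).sum
      = (ks.map (fun g => ((vals g).length : Int) -
          (if g = b then ((vals g).length : Int) else 0) -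
          (if b ∈ vals g ∧ b ≠ g then ((vals g).length : Int) else 0))).sum := by
        exact congrArg List.sum (List.map_congr_left (fun g _ => hpt g))
    _ = _ := by
        rw [sum_map_sub3, sum_ite_eq_of_nodup ks b (fun g => ((vals g).length : Int)) hnd hb]

-- the whole computation after the (shared) graph-building fold
lemma body_eq (G : PySem.Dict Int (List Int)) (hnd : G.keys.Nodup) :
    (let li_value := G.values.foldl
        (fun acc value => value.foldl (fun acc v => acc ++ [v]) acc) ([] : List Int)
     let both := G.keys.foldl (fun acc k => if k ∈ li_value then acc ++ [k] else acc) ([] : List Int)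
     let temp := G.keys.foldl (fun d g =>
        (G.getD g []).foldl
          (fun d v => if v ∈ both then d else d.modify g [] (fun l => l ++ [v])) d)
        (PySem.Dict.empty : PySem.Dict Int (List Int))
     let n := temp.keys.foldl (fun n t => n * ((temp.getD t []).length : Int)) 1
     let answer := (0 : Int) + n
     let answer := both.foldl (fun answer boss =>
        answer + G.keys.foldl (fun n g =>
          if boss ≠ g ∧ boss ∉ G.getD g [] then n + ((G.getD g []).length : Int) else n) 0) answer
     PySem.Int.mod answer 1000000007) =
    (let children := G.values.foldl (fun s vs => PySem.Set.update s vs) PySem.Set.empty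
     let both := G.keys.filter (fun k => k ∈ children)
     let prod := G.values.foldl (fun p vs =>
        let c : Int := vs.countP (fun v => v ∉ both)
        if c ≠ 0 then p * c else p) 1
     let total := G.values.foldl (fun t vs => t + (vs.length : Int)) 0
     let incidence := G.items.foldl (fun d p =>
        (PySem.Set.ofList p.2).foldl
          (fun d node => if node ≠ p.1 then d.modify node 0 (fun x => x + (p.2.length : Int)) else d)
          d)
        (PySem.Dict.empty : PySem.Dict Int Int)
     let bosses := both.foldl (fun acc boss =>
        acc + (total - ((G.getD boss []).length : Int) - incidence.getD boss 0)) 0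
     PySem.Int.mod (prod + bosses) 1000000007) := by
  have hvals : G.values = G.keys.map (fun k => G.getD k []) :=
    PySem.Dict.values_eq_map_keys G hnd []
  have hitems : G.items = G.keys.map (fun k => (k, G.getD k [])) :=
    PySem.Dict.items_eq_map_keys G hnd []
  have hliv : G.values.foldl (fun acc value => value.foldl (fun acc v => acc ++ [v]) acc)
      ([] : List Int) = G.values.flatten := by
    rw [PySem.List.foldl_congr_mem _ _ (fun acc value => acc ++ value) _
      (fun acc x _ => PySem.List.foldl_append_singleton_eq_self x acc),
      PySem.List.foldl_append_eq_flatten, List.nil_append]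
  simp only [hliv]
  have hbothA : G.keys.foldl (fun acc k => if k ∈ G.values.flatten then acc ++ [k] else acc)
      ([] : List Int) = G.keys.filter (fun x => decide (x ∈ G.values.flatten)) := by
    rw [PySem.List.foldl_append_ite_eq_filter (p := fun k => k ∈ G.values.flatten),
      List.nil_append]
  rw [hbothA]
  have hchild : G.values.foldl (fun s vs => PySem.Set.update s vs) PySem.Set.empty =
      PySem.Set.ofList G.values.flatten := by
    rw [show PySem.Set.ofList G.values.flatten =
        G.values.flatten.foldl PySem.Set.add PySem.Set.empty from rfl, List.foldl_flatten]
    rfl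
  rw [hchild]
  rw [show (G.keys.filter (fun k => decide (k ∈ PySem.Set.ofList G.values.flatten))) =
      (G.keys.filter (fun x => decide (x ∈ G.values.flatten))) from
    List.filter_congr (fun x _ => by simp [PySem.Set.mem_ofList])]
  set bth := List.filter (fun x => decide (x ∈ G.values.flatten)) G.keys with hbth
  have htmp := temp_eq G.keys (fun g => G.getD g []) bth PySem.Dict.empty
  beta_reduce at htmp
  rw [htmp]
  rw [temp_keys G.keys (fun g => (G.getD g []).filter (fun v => decide (v ∉ bth)))
    PySem.Dict.empty hnd (by simp)]
  simp only [PySem.Dict.keys_empty, List.nil_append]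
  have hn : (G.keys.filter (fun g => decide ((G.getD g []).filter (fun v => decide (v ∉ bth)) ≠ []))).foldl
      (fun n t => n * (((G.keys.foldl (fun d g => ((G.getD g []).filter (fun v => decide (v ∉ bth))).foldl
          (fun d v => d.modify g [] (fun xs => xs ++ [v])) d)
          PySem.Dict.empty).getD t []).length : Int)) 1 =
      (G.keys.filter (fun g => decide ((G.getD g []).filter (fun v => decide (v ∉ bth)) ≠ []))).foldl
      (fun n t => n * (((G.getD t []).filter (fun v => decide (v ∉ bth))).length : Int)) 1 := by
    apply PySem.List.foldl_congr_mem
    intro acc t ht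
    have htk : t ∈ G.keys := List.mem_of_mem_filter ht
    have hg := temp_getD G.keys (fun g => (G.getD g []).filter (fun v => decide (v ∉ bth)))
      PySem.Dict.empty t hnd
    beta_reduce at hg
    rw [hg]
    simp [htk]
  rw [hn]
  have hSA : ∀ (acc : Int), ∀ boss ∈ bth,
      acc + G.keys.foldl (fun n g =>
          if boss ≠ g ∧ boss ∉ G.getD g [] then n + ((G.getD g []).length : Int) else n) 0 =
      acc + ((G.keys.filter (fun g => decide (boss ≠ g ∧ boss ∉ G.getD g []))).map
          (fun g => ((G.getD g []).length : Int))).sum := by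
    intro acc boss _
    rw [PySem.List.foldl_ite_eq_foldl_filter (p := fun g => boss ≠ g ∧ boss ∉ G.getD g [])
      (f := fun n g => n + ((G.getD g []).length : Int)), PySem.List.foldl_add, zero_add]
  rw [PySem.List.foldl_congr_mem _ _ (fun acc boss =>
      acc + ((G.keys.filter (fun g => decide (boss ≠ g ∧ boss ∉ G.getD g []))).map
        (fun g => ((G.getD g []).length : Int))).sum) _ hSA]
  rw [PySem.List.foldl_add (l := bth)
    (g := fun boss => ((G.keys.filter (fun g => decide (boss ≠ g ∧ boss ∉ G.getD g []))).map
      (fun g => ((G.getD g []).length : Int))).sum)]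
  have hprod : G.values.foldl (fun p vs =>
        if ((vs.countP (fun v => decide (v ∉ bth)) : Int)) ≠ 0 then
          p * ((vs.countP (fun v => decide (v ∉ bth)) : Int)) else p) 1 =
      (G.keys.filter (fun g => decide ((G.getD g []).filter (fun v => decide (v ∉ bth)) ≠ []))).foldl
        (fun n t => n * (((G.getD t []).filter (fun v => decide (v ∉ bth))).length : Int)) 1 := by
    rw [hvals, List.foldl_map]
    rw [PySem.List.foldl_ite_eq_foldl_filter
      (p := fun k => (((G.getD k []).countP (fun v => decide (v ∉ bth)) : Int)) ≠ 0)
      (f := fun p k => p * (((G.getD k []).countP (fun v => decide (v ∉ bth)) : Int)))]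
    have hfil : G.keys.filter
        (fun k => decide ((((G.getD k []).countP (fun v => decide (v ∉ bth)) : Int)) ≠ 0)) =
        G.keys.filter (fun g => decide ((G.getD g []).filter (fun v => decide (v ∉ bth)) ≠ [])) := by
      apply List.filter_congr
      intro x _
      simp [List.countP_eq_length_filter]
    rw [hfil]
    apply PySem.List.foldl_congr_mem
    intro acc t ht
    rw [List.countP_eq_length_filter]
  rw [hprod]
  have htotal : G.values.foldl (fun t vs => t + (vs.length : Int)) 0 =
      0 + (G.keys.map (fun k => ((G.getD k []).length : Int))).sum := by
    rw [hvals, List.foldl_map, PySem.List.foldl_add (g := fun k => ((G.getD k []).length : Int))]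
  rw [htotal]
  have hI : ∀ b : Int, (G.items.foldl (fun d p =>
        (PySem.Set.ofList p.2).foldl
          (fun d node => if node ≠ p.1 then d.modify node 0 (fun x => x + (p.2.length : Int)) else d)
          d) (PySem.Dict.empty : PySem.Dict Int Int)).getD b 0 =
      (G.keys.map (fun k => if b ∈ G.getD k [] ∧ b ≠ k then ((G.getD k []).length : Int) else 0)).sum := by
    intro b
    rw [incid_outer, hitems, List.map_map]
    simp [Function.comp_def]
  have hSB : ∀ (acc : Int), ∀ boss ∈ bth,
      acc + (0 + (G.keys.map (fun k => ((G.getD k []).length : Int))).sum -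
        ((G.getD boss []).length : Int) -
        (G.items.foldl (fun d p =>
          (PySem.Set.ofList p.2).foldl
            (fun d node => if node ≠ p.1 then d.modify node 0 (fun x => x + (p.2.length : Int)) else d)
            d) (PySem.Dict.empty : PySem.Dict Int Int)).getD boss 0) =
      acc + ((G.keys.filter (fun g => decide (boss ≠ g ∧ boss ∉ G.getD g []))).map
        (fun g => ((G.getD g []).length : Int))).sum := by
    intro acc boss hboss
    have hbk : boss ∈ G.keys := List.mem_of_mem_filter (hbth ▸ hboss)
    have hc := boss_complement G.keys (fun g => G.getD g []) boss hnd hbk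
    beta_reduce at hc
    rw [hI boss, hc]
    ring
  rw [PySem.List.foldl_congr_mem _ _ (fun acc boss =>
      acc + ((G.keys.filter (fun g => decide (boss ≠ g ∧ boss ∉ G.getD g []))).map
        (fun g => ((G.getD g []).length : Int))).sum) _ hSB]
  rw [PySem.List.foldl_add (l := bth)
    (g := fun boss => ((G.keys.filter (fun g => decide (boss ≠ g ∧ boss ∉ G.getD g []))).map
      (fun g => ((G.getD g []).length : Int))).sum)]
  congr 1
  ring

-- ===== VERDICT (by name: the statement is the Claim_ definition above) =====
theorem solution_spec : Claim_equal_solution := by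
  intro links _ _
  unfold Spec_solution solution solution_alt
  exact body_eq _ (PySem.Dict.nodup_keys_foldl_modify_key links
    (fun link => PySem.List.pyGetD link 0 0) []
    (fun _ link => fun l => l ++ [PySem.List.pyGetD link 1 0]) PySem.Dict.empty
    PySem.Dict.nodup_keys_empty)
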